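-- pv_equiv track=rewrite | github.com/jw9603/CodeTree | 250412/메두사와 전사들/medusa-and-warriors.py | move_warriors
-- ===== SOURCE A (Python) =====
-- DRC = [(-1, 0), (1, 0), (0, -1), (0, 1)] # 상, 하, 좌, 우
--
-- DRC2 = [(0, -1), (0, 1), (-1, 0), (1, 0)] # 좌, 우, 상, 하
--
-- def move_warriors(N, warriors, medusa_map, mi, mj):
--
--     move, attack = 0, 0
--
--     for dirs in [DRC, DRC2]:
--
--         for idx in range(len(warriors) - 1, -1, -1):
--
--             ci, cj = warriors[idx]
--             if medusa_map[ci][cj] == 1: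
--                 continue
--
--             dist = abs(mi - ci) + abs(mj - cj)
--
--             for d in dirs:
--                 ni, nj = ci + d[0], cj + d[1]
--                 if 0 <= ni < N and 0 <= nj < N and medusa_map[ni][nj] != 1 and dist > abs(ni - mi) + abs(nj - mj):
--                     if (ni, nj) == (mi, mj):
--                         attack += 1
--                         warriors.pop(idx)
--                     else:
--                         warriors[idx] = [ni, nj]
--
--                     move += 1
--                     break
--
--     return move, attack
-- ===== SOURCE B (Python) =====
-- # Loop nesting swapped: each warrior's movement depends only on its own position and
-- # the static map, so B processes each warrior once through BOTH direction orders,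
-- # keeping only counters. Unlike A it never mutates `warriors` (return value only).
--
-- DRC = [(-1, 0), (1, 0), (0, -1), (0, 1)]
-- DRC2 = [(0, -1), (0, 1), (-1, 0), (1, 0)]
--
--
-- def _step(N, medusa_map, mi, mj, dirs, ci, cj):
--     """New position after one step in `dirs` priority order, or None if the warrior
--     stands on a blocked cell or no in-bounds, unblocked, distance-reducing move exists."""
--     if medusa_map[ci][cj] == 1:
--         return None
--     dist = abs(mi - ci) + abs(mj - cj)
--     return next(((ci + di, cj + dj) for di, dj in dirs
--                  if 0 <= ci + di < N and 0 <= cj + dj < N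
--                  and medusa_map[ci + di][cj + dj] != 1
--                  and abs(ci + di - mi) + abs(cj + dj - mj) < dist), None)
--
--
-- def move_warriors(N, warriors, medusa_map, mi, mj):
--     move, attack = 0, 0
--     for ci, cj in warriors:
--         for dirs in (DRC, DRC2):
--             tgt = _step(N, medusa_map, mi, mj, dirs, ci, cj)
--             if tgt is None:
--                 continue
--             move += 1
--             if tgt == (mi, mj):
--                 attack += 1
--                 break  # warrior reached the medusa: no second step
--             ci, cj = tgt
--     return move, attack
-- ===== Notes on version B (the rewrite author's own statement) =====
-- stated objective: simpler
-- what changed: Loop nesting swapped: instead of two whole-list passes that pop/overwrite the warrior list in reverse index order, B walks each warrior once through both direction orders (warriors move independently of each other), keeping only the two counters and never building or mutating a list; A mutates `warriors` in place, B does not (equivalence is about the return value).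
-- outside the precondition, e.g. on move_warriors(3, [[0, 1]], [[0, 0], [1, 1]], 0, 0): A returns (1, 1), B returns (1, 1)
import Mathlib
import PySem

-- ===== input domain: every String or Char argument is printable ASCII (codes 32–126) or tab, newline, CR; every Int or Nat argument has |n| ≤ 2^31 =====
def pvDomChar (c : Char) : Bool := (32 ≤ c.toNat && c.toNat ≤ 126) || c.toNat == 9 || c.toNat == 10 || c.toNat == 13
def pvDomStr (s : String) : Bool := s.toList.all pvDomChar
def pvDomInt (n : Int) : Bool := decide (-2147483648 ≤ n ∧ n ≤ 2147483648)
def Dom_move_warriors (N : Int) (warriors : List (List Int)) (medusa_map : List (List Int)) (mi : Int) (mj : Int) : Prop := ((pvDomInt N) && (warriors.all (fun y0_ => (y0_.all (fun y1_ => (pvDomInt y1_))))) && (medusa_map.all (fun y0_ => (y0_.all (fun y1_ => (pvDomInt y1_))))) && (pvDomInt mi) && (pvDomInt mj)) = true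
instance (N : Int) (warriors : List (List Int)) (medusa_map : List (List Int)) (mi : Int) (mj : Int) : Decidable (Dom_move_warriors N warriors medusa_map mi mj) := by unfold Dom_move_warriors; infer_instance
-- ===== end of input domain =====

-- B swaps the loop nesting: each warrior walks through BOTH direction orders at once
-- (warriors move independently), keeping only counters (objective: simpler).
-- A mutates `warriors` in place, B does not; the theorem is about the return value only.

-- ===== PORT A =====
-- shared grid helper: medusa_map[i][j] as an Option (none = IndexError in Python)
def pvGet2 (mmap : List (List Int)) (i j : Int) : Option Int :=
  (PySem.List.pyGet? mmap i).bind (fun row => PySem.List.pyGet? row j)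

def pvDRC : List (Int × Int) := [(-1, 0), (1, 0), (0, -1), (0, 1)]
def pvDRC2 : List (Int × Int) := [(0, -1), (0, 1), (-1, 0), (1, 0)]

-- A's inner `for d in dirs: ... break` loop: first direction passing the test
def pvDirScan (N : Int) (mmap : List (List Int)) (mi mj ci cj dist : Int) :
    List (Int × Int) → Option (Int × Int)
  | [] => none
  | d :: rest =>
    let ni := ci + d.1
    let nj := cj + d.2
    if 0 ≤ ni ∧ ni < N ∧ 0 ≤ nj ∧ nj < N ∧ pvGet2 mmap ni nj ≠ some 1 ∧
        |ni - mi| + |nj - mj| < dist then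
      some (ni, nj)
    else
      pvDirScan N mmap mi mj ci cj dist rest

-- A's body of `for idx in range(len(warriors)-1, -1, -1)`; off Pre_ (where Python
-- raises) a failing pyGet?/unpack is treated as `continue` and pop? failure keeps ws
def pvStepA (N : Int) (mmap : List (List Int)) (mi mj : Int) (dirs : List (Int × Int))
    (st : List (List Int) × Int × Int) (idx : Int) : List (List Int) × Int × Int :=
  match PySem.List.pyGet? st.1 idx with
  | some [ci, cj] =>
    if pvGet2 mmap ci cj = some 1 then st
    else
      let dist := |mi - ci| + |mj - cj|
      match pvDirScan N mmap mi mj ci cj dist dirs with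
      | none => st
      | some (ni, nj) =>
        if ni = mi ∧ nj = mj then
          match PySem.List.pop? st.1 idx with
          | some r => (r.2, st.2.1 + 1, st.2.2 + 1)
          | none => (st.1, st.2.1 + 1, st.2.2 + 1)
        else
          (PySem.List.pySetD st.1 idx [ni, nj], st.2.1 + 1, st.2.2)
  | _ => st

def pvPassA (N : Int) (mmap : List (List Int)) (mi mj : Int) (dirs : List (Int × Int))
    (st : List (List Int) × Int × Int) : List (List Int) × Int × Int :=
  (PySem.List.pyRange ((st.1.length : Int) - 1) (-1) (-1)).foldl (pvStepA N mmap mi mj dirs) st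

def move_warriors (N : Int) (warriors : List (List Int)) (medusa_map : List (List Int)) (mi : Int) (mj : Int) : Int × Int :=
  let st := [pvDRC, pvDRC2].foldl (fun st dirs => pvPassA N medusa_map mi mj dirs st)
      (warriors, 0, 0)
  (st.2.1, st.2.2)

-- ===== PORT B =====
-- Source B's `_step`: next(...) over the directions, via List.find?
def pvFindStep (N : Int) (mmap : List (List Int)) (mi mj ci cj : Int)
    (dirs : List (Int × Int)) : Option (Int × Int) :=
  if pvGet2 mmap ci cj = some 1 then none
  else
    let dist := |mi - ci| + |mj - cj|
    (dirs.find? (fun d =>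
        decide (0 ≤ ci + d.1 ∧ ci + d.1 < N ∧ 0 ≤ cj + d.2 ∧ cj + d.2 < N ∧
          pvGet2 mmap (ci + d.1) (cj + d.2) ≠ some 1 ∧
          |ci + d.1 - mi| + |cj + d.2 - mj| < dist))).map
      (fun d => (ci + d.1, cj + d.2))

-- Source B's `for dirs in (DRC, DRC2)` loop with its `break`, per warrior
def pvBoth (N : Int) (mmap : List (List Int)) (mi mj : Int) :
    List (List (Int × Int)) → Int → Int → Int → Int → Int × Int
  | [], _, _, m, a => (m, a)
  | dirs :: rest, ci, cj, m, a =>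
    match pvFindStep N mmap mi mj ci cj dirs with
    | none => pvBoth N mmap mi mj rest ci cj m a
    | some (ni, nj) =>
      if ni = mi ∧ nj = mj then (m + 1, a + 1)
      else pvBoth N mmap mi mj rest ni nj (m + 1) a

def move_warriors_alt (N : Int) (warriors : List (List Int)) (medusa_map : List (List Int)) (mi : Int) (mj : Int) : Int × Int :=
  warriors.foldl (fun st w =>
      match w with
      | [ci, cj] => pvBoth N medusa_map mi mj [pvDRC, pvDRC2] ci cj st.1 st.2
      | _ => st)   -- non-pair warrior: Python raises there (outside Pre_)
    (0, 0)

-- ===== PRECONDITION & SPEC =====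
def pvPair? (w : List Int) : Option (Int × Int) :=
  match w with
  | [ci, cj] => some (ci, cj)
  | _ => none

-- Pre_ = the inputs on which the Python raises no exception: every warrior is a
-- pair indexing an existing cell (Python's negative-index wraparound included), and
-- if any warrior stands on an unblocked cell (so the direction scan runs), the grid
-- covers the whole N x N scan area.  The last conjunct is slightly conservative: it
-- also excludes inputs whose scan happens to avoid the missing cells, on which A
-- still returns (see cites).
def Pre_move_warriors (N : Int) (warriors : List (List Int)) (medusa_map : List (List Int)) (mi : Int) (mj : Int) : Prop :=
  (warriors.all (fun w =>
      match pvPair? w with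
      | some (ci, cj) => (pvGet2 medusa_map ci cj).isSome
      | none => false) = true) ∧
  ((warriors.any (fun w =>
      match pvPair? w with
      | some (ci, cj) => !(pvGet2 medusa_map ci cj == some 1)
      | none => false) = true) →
    N ≤ 0 ∨ (N ≤ (medusa_map.length : Int) ∧
      ∀ row ∈ medusa_map.take N.toNat, N ≤ (row.length : Int)))
instance (N : Int) (warriors : List (List Int)) (medusa_map : List (List Int)) (mi : Int) (mj : Int) : Decidable (Pre_move_warriors N warriors medusa_map mi mj) := by unfold Pre_move_warriors; infer_instance

def pvWitness_move_warriors : Int × List (List Int) × List (List Int) × Int × Int :=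
  (3, [[0, 0], [2, 2]], [[0, 0, 0], [0, 1, 0], [0, 0, 0]], 1, 0)

def Spec_move_warriors (N : Int) (warriors : List (List Int)) (medusa_map : List (List Int)) (mi : Int) (mj : Int) (out : Int × Int) : Prop := out = move_warriors_alt N warriors medusa_map mi mj
instance (N : Int) (warriors : List (List Int)) (medusa_map : List (List Int)) (mi : Int) (mj : Int) (out : Int × Int) : Decidable (Spec_move_warriors N warriors medusa_map mi mj out) := by unfold Spec_move_warriors; infer_instance

-- ===== CLAIM (what is proved, stated in full; the proofs are below) =====
def Claim_equal_move_warriors : Prop := ∀ (N : Int) (warriors : List (List Int)) (medusa_map : List (List Int)) (mi : Int) (mj : Int), Dom_move_warriors N warriors medusa_map mi mj → Pre_move_warriors N warriors medusa_map mi mj → Spec_move_warriors N warriors medusa_map mi mj (move_warriors N warriors medusa_map mi mj)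

-- ===== LEMMAS AND PROOFS =====

-- per-warrior outcome of one pass (survivor, move increment, attack increment)
def pvOut (N : Int) (mmap : List (List Int)) (mi mj : Int) (dirs : List (Int × Int))
    (w : List Int) : Option (List Int) × Int × Int :=
  match w with
  | [ci, cj] =>
    if pvGet2 mmap ci cj = some 1 then (some w, 0, 0)
    else
      match pvDirScan N mmap mi mj ci cj (|mi - ci| + |mj - cj|) dirs with
      | none => (some w, 0, 0)
      | some (ni, nj) =>
        if ni = mi ∧ nj = mj then (none, 1, 1) else (some [ni, nj], 1, 0)
  | _ => (some w, 0, 0)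

-- aggregate of pvOut over a list, front to back
def pvAgg (N : Int) (mmap : List (List Int)) (mi mj : Int) (dirs : List (Int × Int)) :
    List (List Int) → List (List Int) × Int × Int
  | [] => ([], 0, 0)
  | w :: ws =>
    let o := pvOut N mmap mi mj dirs w
    let r := pvAgg N mmap mi mj dirs ws
    (o.1.toList ++ r.1, o.2.1 + r.2.1, o.2.2 + r.2.2)

theorem pvAgg_append (N : Int) (mmap : List (List Int)) (mi mj : Int)
    (dirs : List (Int × Int)) (xs ys : List (List Int)) :
    pvAgg N mmap mi mj dirs (xs ++ ys) =
      ((pvAgg N mmap mi mj dirs xs).1 ++ (pvAgg N mmap mi mj dirs ys).1,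
       (pvAgg N mmap mi mj dirs xs).2.1 + (pvAgg N mmap mi mj dirs ys).2.1,
       (pvAgg N mmap mi mj dirs xs).2.2 + (pvAgg N mmap mi mj dirs ys).2.2) := by
  induction xs with
  | nil => simp [pvAgg]
  | cons w xs ih =>
    simp only [List.cons_append, pvAgg, ih]
    refine Prod.ext (by simp) (Prod.ext (by simp; ring) (by simp; ring))

-- countdown indices [n-1, ..., 0]
def pvRevIdx : Nat → List Int
  | 0 => []
  | n + 1 => (n : Int) :: pvRevIdx n

theorem pvRange_countdown (n : Nat) :
    PySem.List.pyRange ((n : Int) - 1) (-1) (-1) = pvRevIdx n := by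
  induction n with
  | zero => simp [pvRevIdx, PySem.List.pyRange_neg_one_eq_nil]
  | succ n ih =>
    rw [PySem.List.pyRange_neg_one_cons (by push_cast; omega)]
    rw [show (((n + 1 : Nat)) : Int) - 1 = (n : Int) by push_cast; ring]
    rw [ih]
    rfl

theorem pvEraseIdx_append (pre : List (List Int)) (w : List Int) (s : List (List Int)) :
    (pre ++ w :: s).eraseIdx pre.length = pre ++ s := by
  induction pre with
  | nil => simp
  | cons x pre ih => simp [ih]

theorem pvSet_append (pre : List (List Int)) (w v : List Int) (s : List (List Int)) :
    (pre ++ w :: s).set pre.length v = pre ++ v :: s := by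
  induction pre with
  | nil => simp
  | cons x pre ih => simp [ih]

theorem pvStepA_last (N : Int) (mmap : List (List Int)) (mi mj : Int)
    (dirs : List (Int × Int)) (pre : List (List Int)) (w : List Int)
    (s : List (List Int)) (m a : Int) :
    pvStepA N mmap mi mj dirs (pre ++ w :: s, m, a) ((pre.length : Nat) : Int) =
      (pre ++ (pvOut N mmap mi mj dirs w).1.toList ++ s,
       m + (pvOut N mmap mi mj dirs w).2.1,
       a + (pvOut N mmap mi mj dirs w).2.2) := by
  have hget : PySem.List.pyGet? (pre ++ w :: s) ((pre.length : Nat) : Int) = some w :=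
    PySem.List.pyGet?_append_length pre s w
  have hlt : pre.length < (pre ++ w :: s).length := by simp
  have hpop : PySem.List.pop? (pre ++ w :: s) ((pre.length : Nat) : Int) =
      some ((pre ++ w :: s)[pre.length]'(hlt), (pre ++ w :: s).eraseIdx pre.length) :=
    PySem.List.pop?_natCast (pre ++ w :: s) pre.length hlt
  match w with
  | [] => simp [pvStepA, pvOut]
  | [_] => simp [pvStepA, pvOut]
  | _ :: _ :: _ :: _ => simp [pvStepA, pvOut]
  | [ci, cj] =>
    simp only [pvStepA, hget, pvOut]
    split_ifs with h1
    · simp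
    · cases hscan : pvDirScan N mmap mi mj ci cj (|mi - ci| + |mj - cj|) dirs with
      | none => simp
      | some p =>
        obtain ⟨ni, nj⟩ := p
        by_cases h2 : ni = mi ∧ nj = mj
        · simp only [h2, if_true, and_self]
          rw [hpop, pvEraseIdx_append]
          simp
        · simp only [h2, if_false]
          rw [PySem.List.pySetD_natCast (pre ++ [ci, cj] :: s) pre.length [ni, nj], pvSet_append]
          simp

theorem pvPassA_aux (N : Int) (mmap : List (List Int)) (mi mj : Int)
    (dirs : List (Int × Int)) (pre s : List (List Int)) (m a : Int) :
    (pvRevIdx pre.length).foldl (pvStepA N mmap mi mj dirs) (pre ++ s, m, a) =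
      ((pvAgg N mmap mi mj dirs pre).1 ++ s,
       m + (pvAgg N mmap mi mj dirs pre).2.1,
       a + (pvAgg N mmap mi mj dirs pre).2.2) := by
  induction pre using List.reverseRecOn generalizing s m a with
  | nil => simp [pvRevIdx, pvAgg]
  | append_singleton q w ih =>
    have hlen : (q ++ [w]).length = q.length + 1 := by simp
    rw [hlen]
    simp only [pvRevIdx, List.foldl_cons]
    rw [show q ++ [w] ++ s = q ++ w :: s by simp]
    rw [pvStepA_last]
    rw [show q ++ (pvOut N mmap mi mj dirs w).1.toList ++ s =
          q ++ ((pvOut N mmap mi mj dirs w).1.toList ++ s) by simp]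
    rw [ih]
    rw [pvAgg_append]
    simp only [pvAgg]
    refine Prod.ext (by simp) (Prod.ext (by simp; ring) (by simp; ring))

theorem pvPassA_agg (N : Int) (mmap : List (List Int)) (mi mj : Int)
    (dirs : List (Int × Int)) (ws : List (List Int)) (m a : Int) :
    pvPassA N mmap mi mj dirs (ws, m, a) =
      ((pvAgg N mmap mi mj dirs ws).1,
       m + (pvAgg N mmap mi mj dirs ws).2.1,
       a + (pvAgg N mmap mi mj dirs ws).2.2) := by
  unfold pvPassA
  rw [show ((ws, m, a) : List (List Int) × Int × Int).1 = ws from rfl]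
  rw [pvRange_countdown ws.length]
  have := pvPassA_aux N mmap mi mj dirs ws [] m a
  simpa using this

-- B's find?-based step equals A's hand-recursed direction scan
theorem pvFindStep_eq (N : Int) (mmap : List (List Int)) (mi mj ci cj : Int)
    (dirs : List (Int × Int)) :
    pvFindStep N mmap mi mj ci cj dirs =
      if pvGet2 mmap ci cj = some 1 then none
      else pvDirScan N mmap mi mj ci cj (|mi - ci| + |mj - cj|) dirs := by
  unfold pvFindStep
  split_ifs with h
  · rfl
  · generalize |mi - ci| + |mj - cj| = dist
    induction dirs with
    | nil => simp [pvDirScan]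
    | cons d rest ih =>
      simp only [List.find?_cons]
      by_cases hc : 0 ≤ ci + d.1 ∧ ci + d.1 < N ∧ 0 ≤ cj + d.2 ∧ cj + d.2 < N ∧
          pvGet2 mmap (ci + d.1) (cj + d.2) ≠ some 1 ∧
          |ci + d.1 - mi| + |cj + d.2 - mj| < dist
      · simp only [pvDirScan]
        simp [hc]
      · have hb : (decide (0 ≤ ci + d.1 ∧ ci + d.1 < N ∧ 0 ≤ cj + d.2 ∧ cj + d.2 < N ∧
            pvGet2 mmap (ci + d.1) (cj + d.2) ≠ some 1 ∧
            |ci + d.1 - mi| + |cj + d.2 - mj| < dist)) = false := decide_eq_false hc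
        simp only [hb, pvDirScan]
        rw [if_neg hc]
        simpa using ih

-- equation lemmas for B's loop (used to unfold one layer at a time)
theorem pvBoth_nil (N : Int) (mmap : List (List Int)) (mi mj ci cj m a : Int) :
    pvBoth N mmap mi mj [] ci cj m a = (m, a) := rfl

theorem pvBoth_cons (N : Int) (mmap : List (List Int)) (mi mj : Int)
    (dirs : List (Int × Int)) (rest : List (List (Int × Int))) (ci cj m a : Int) :
    pvBoth N mmap mi mj (dirs :: rest) ci cj m a =
      (match pvFindStep N mmap mi mj ci cj dirs with
       | none => pvBoth N mmap mi mj rest ci cj m a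
       | some (ni, nj) =>
         if ni = mi ∧ nj = mj then (m + 1, a + 1)
         else pvBoth N mmap mi mj rest ni nj (m + 1) a) := rfl

-- pvOut on a coordinate pair, phrased through B's step function
theorem pvOut_pair (N : Int) (mmap : List (List Int)) (mi mj : Int)
    (dirs : List (Int × Int)) (x y : Int) :
    pvOut N mmap mi mj dirs [x, y] =
      (match pvFindStep N mmap mi mj x y dirs with
       | none => (some [x, y], 0, 0)
       | some (ni, nj) =>
         if ni = mi ∧ nj = mj then (none, 1, 1) else (some [ni, nj], 1, 0)) := by
  rw [pvFindStep_eq]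
  simp only [pvOut]
  split_ifs with h
  · rfl
  · cases pvDirScan N mmap mi mj x y (|mi - x| + |mj - y|) dirs with
    | none => rfl
    | some p => rfl

-- total per-warrior contribution of the two A-passes
def pvTot (N : Int) (mmap : List (List Int)) (mi mj : Int) (w : List Int) : Int × Int :=
  let o1 := pvOut N mmap mi mj pvDRC w
  match o1.1 with
  | none => (o1.2.1, o1.2.2)
  | some w' =>
    let o2 := pvOut N mmap mi mj pvDRC2 w'
    (o1.2.1 + o2.2.1, o1.2.2 + o2.2.2)

-- B's loop body realises pvTot
theorem pvBoth_eq_tot (N : Int) (mmap : List (List Int)) (mi mj ci cj m a : Int) :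
    pvBoth N mmap mi mj [pvDRC, pvDRC2] ci cj m a =
      (m + (pvTot N mmap mi mj [ci, cj]).1, a + (pvTot N mmap mi mj [ci, cj]).2) := by
  simp only [pvTot, pvOut_pair]
  rw [pvBoth_cons]
  cases hf1 : pvFindStep N mmap mi mj ci cj pvDRC with
  | none =>
    rw [pvBoth_cons]
    cases hf2 : pvFindStep N mmap mi mj ci cj pvDRC2 with
    | none => simp [pvBoth_nil, pvOut_pair, hf2]
    | some p =>
      obtain ⟨ni, nj⟩ := p
      by_cases h2 : ni = mi ∧ nj = mj <;>
        simp [h2, pvBoth_nil, pvOut_pair, hf2]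
  | some p =>
    obtain ⟨ni, nj⟩ := p
    by_cases h2 : ni = mi ∧ nj = mj
    · simp [h2]
    · simp only [h2, if_false]
      rw [pvBoth_cons]
      cases hf2 : pvFindStep N mmap mi mj ni nj pvDRC2 with
      | none => simp [pvBoth_nil, pvOut_pair, hf2]
      | some q =>
        obtain ⟨oi, oj⟩ := q
        by_cases h3 : oi = mi ∧ oj = mj <;>
          simp [h3, pvBoth_nil, pvOut_pair, hf2] <;> omega

-- per-warrior totals, summed front to back
def pvSum (N : Int) (mmap : List (List Int)) (mi mj : Int) :
    List (List Int) → Int × Int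
  | [] => (0, 0)
  | w :: ws =>
    let t := pvTot N mmap mi mj w
    let r := pvSum N mmap mi mj ws
    (t.1 + r.1, t.2 + r.2)

-- the two A-passes, composed, count exactly the per-warrior totals
theorem pvAgg_two (N : Int) (mmap : List (List Int)) (mi mj : Int)
    (ws : List (List Int)) :
    ((pvAgg N mmap mi mj pvDRC ws).2.1 +
       (pvAgg N mmap mi mj pvDRC2 (pvAgg N mmap mi mj pvDRC ws).1).2.1,
     (pvAgg N mmap mi mj pvDRC ws).2.2 +
       (pvAgg N mmap mi mj pvDRC2 (pvAgg N mmap mi mj pvDRC ws).1).2.2) =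
      pvSum N mmap mi mj ws := by
  induction ws with
  | nil => simp [pvAgg, pvSum]
  | cons w ws ih =>
    simp only [pvAgg, pvSum, pvAgg_append]
    rw [← ih]
    cases h1 : (pvOut N mmap mi mj pvDRC w).1 with
    | none =>
      simp only [pvTot, h1, Option.toList_none, pvAgg]
      refine Prod.ext (by simp; ring) (by simp; ring)
    | some w' =>
      simp only [pvTot, h1, Option.toList_some]
      simp only [pvAgg]
      refine Prod.ext (by simp; ring) (by simp; ring)

-- B's fold accumulates the same totals
theorem pvFoldB (N : Int) (mmap : List (List Int)) (mi mj : Int)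
    (ws : List (List Int)) (m a : Int) :
    ws.foldl (fun st w =>
        match w with
        | [ci, cj] => pvBoth N mmap mi mj [pvDRC, pvDRC2] ci cj st.1 st.2
        | _ => st) (m, a) =
      (m + (pvSum N mmap mi mj ws).1, a + (pvSum N mmap mi mj ws).2) := by
  induction ws generalizing m a with
  | nil => simp [pvSum]
  | cons w ws ih =>
    have hstep : (match w with
        | [ci, cj] => pvBoth N mmap mi mj [pvDRC, pvDRC2] ci cj m a
        | _ => ((m, a) : Int × Int)) =
        (m + (pvTot N mmap mi mj w).1, a + (pvTot N mmap mi mj w).2) := by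
      match w with
      | [] => simp [pvTot, pvOut]
      | [_] => simp [pvTot, pvOut]
      | _ :: _ :: _ :: _ => simp [pvTot, pvOut]
      | [ci, cj] => exact pvBoth_eq_tot N mmap mi mj ci cj m a
    rw [List.foldl_cons, hstep, ih]
    simp only [pvSum]
    refine Prod.ext (by simp; ring) (by simp; ring)

-- ===== VERDICT (by name: the statement is the Claim_ definition above) =====
theorem move_warriors_spec : Claim_equal_move_warriors := by
  intro N warriors medusa_map mi mj _ _
  unfold Spec_move_warriors move_warriors move_warriors_alt
  simp only [List.foldl_cons, List.foldl_nil]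
  rw [pvPassA_agg, pvPassA_agg, pvFoldB]
  have := pvAgg_two N medusa_map mi mj warriors
  have h1 := congrArg Prod.fst this
  have h2 := congrArg Prod.snd this
  simp at h1 h2
  refine Prod.ext (by simpa using h1) (by simpa using h2)
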